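-- pv_equiv track=rewrite | github.com/whgusdn321/Competitive-programming | Baekjoon,SWEA, etc/프로그래머스/블록게임.py | canTerminated
-- ===== SOURCE A (Python) =====
-- def canTerminated(block, board):
--     id = block[0]
--     cords = block[1]
--     if id == 1:
--         sy, sx = cords[2]
--         boool = True
--         for i in range(0, sy):
--             if board[i][sx] != 0:
--                 boool = False
--
--         sy, sx = cords[3]
--         for i in range(0, sy):
--             if board[i][sx] != 0:
--                 boool = False
--         return boool
--
--     elif id == 2:
--         sy, sx = cords[3]
--         boool = True
--         for i in range(0, sy):
--             if board[i][sx] != 0: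
--                 boool = False
--         return boool
--
--     elif id == 3:
--         sy, sx = cords[3]
--         boool = True
--         for i in range(0, sy):
--             if board[i][sx] != 0:
--                 boool = False
--         return boool
--     elif id == 4:
--         sy, sx = cords[2]
--         boool = True
--         for i in range(0, sy):
--             if board[i][sx] != 0:
--                 boool = False
--
--         sy, sx = cords[3]
--         for i in range(0, sy):
--             if board[i][sx] != 0:
--                 boool = False
--         return boool
--     else : ## id == 5
--         sy, sx = cords[1]
--         boool = True
--         for i in range(0, sy):
--             if board[i][sx] != 0:
--                 boool = False
--
--         sy, sx = cords[3]
--         for i in range(0, sy):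
--             if board[i][sx] != 0:
--                 boool = False
--         return boool
-- ===== SOURCE B (Python) =====
-- def canTerminated(block, board):
--     id, cords = block
--     if id in (1, 4):
--         sel = [cords[2], cords[3]]
--     elif id in (2, 3):
--         sel = [cords[3]]
--     else:
--         sel = [cords[1], cords[3]]
--     top = {}
--     for i, row in enumerate(board):
--         for j, v in enumerate(row):
--             if v != 0 and j not in top:
--                 top[j] = i
--     return all(sy <= top.get(sx, sy) for sy, sx in sel)
-- ===== Notes on version B (the rewrite author's own statement) =====
-- stated objective: alternative
-- what changed: Instead of scanning each inspected column upward, B makes one pass over the whole board building an index dict of the first nonzero row of every column and then answers each inspected cord with a single O(1) lookup; Pre_ additionally excludes cords with a positive scan height and a negative column index, where A silently reads a wrapped column via Python negative indexing (malformed coordinates for this board game).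
-- outside the precondition, e.g. on canTerminated((2, [(0, 0), (0, 0), (0, 0), (1, -1)]), [[5]]): A returns False, B returns True
import Mathlib
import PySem

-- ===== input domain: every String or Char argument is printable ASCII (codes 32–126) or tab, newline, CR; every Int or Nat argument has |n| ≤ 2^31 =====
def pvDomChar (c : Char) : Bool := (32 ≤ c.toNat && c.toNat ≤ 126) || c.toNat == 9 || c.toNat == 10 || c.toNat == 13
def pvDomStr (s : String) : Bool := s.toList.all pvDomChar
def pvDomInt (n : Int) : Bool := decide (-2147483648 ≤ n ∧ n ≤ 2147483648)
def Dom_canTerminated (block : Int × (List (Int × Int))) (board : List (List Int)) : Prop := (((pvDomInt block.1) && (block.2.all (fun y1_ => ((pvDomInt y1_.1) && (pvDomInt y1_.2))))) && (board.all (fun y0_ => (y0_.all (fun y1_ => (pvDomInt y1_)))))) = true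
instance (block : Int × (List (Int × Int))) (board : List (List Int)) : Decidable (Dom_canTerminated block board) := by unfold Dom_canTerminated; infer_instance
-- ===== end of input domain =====

-- B replaces per-column upward scans by one pass over the board building a first-nonzero-row index
-- per column, answered by O(1) lookups (objective: alternative, same order of cost).

-- ===== PORT A =====
-- A's five branches each run the same accumulator loop over one or two cords; ported with one helper
-- for that identical loop body.
def pvScanA (board : List (List Int)) (c : Int × Int) (b0 : Bool) : Bool :=
  (List.range c.1.toNat).foldl (fun (b : Bool) (i : Nat) =>
    if ((PySem.List.pyGet? board (i : Int)).bind (fun row => PySem.List.pyGet? row c.2)).getD 0 ≠ 0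
    then false else b) b0

def canTerminated (block : Int × (List (Int × Int))) (board : List (List Int)) : Bool :=
  let id := block.1
  let cords := block.2
  if id = 1 then
    let boool := pvScanA board ((PySem.List.pyGet? cords 2).getD (0, 0)) true
    pvScanA board ((PySem.List.pyGet? cords 3).getD (0, 0)) boool
  else if id = 2 then
    pvScanA board ((PySem.List.pyGet? cords 3).getD (0, 0)) true
  else if id = 3 then
    pvScanA board ((PySem.List.pyGet? cords 3).getD (0, 0)) true
  else if id = 4 then
    let boool := pvScanA board ((PySem.List.pyGet? cords 2).getD (0, 0)) true
    pvScanA board ((PySem.List.pyGet? cords 3).getD (0, 0)) boool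
  else
    let boool := pvScanA board ((PySem.List.pyGet? cords 1).getD (0, 0)) true
    pvScanA board ((PySem.List.pyGet? cords 3).getD (0, 0)) boool

-- ===== PORT B =====
-- top = {}; for i,row in enumerate(board): for j,v in enumerate(row): if v != 0 and j not in top: top[j] = i
def pvTop (board : List (List Int)) : PySem.Dict Int Int :=
  (PySem.List.enumerate board 0).foldl (fun d p =>
    (PySem.List.enumerate p.2 0).foldl (fun d2 q =>
      if q.2 ≠ 0 ∧ d2.contains q.1 = false then d2.insert q.1 p.1 else d2) d) PySem.Dict.empty

def canTerminated_alt (block : Int × (List (Int × Int))) (board : List (List Int)) : Bool :=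
  let cords := block.2
  let sel : List (Int × Int) :=
    if block.1 = 1 ∨ block.1 = 4 then
      [(PySem.List.pyGet? cords 2).getD (0, 0), (PySem.List.pyGet? cords 3).getD (0, 0)]
    else if block.1 = 2 ∨ block.1 = 3 then
      [(PySem.List.pyGet? cords 3).getD (0, 0)]
    else
      [(PySem.List.pyGet? cords 1).getD (0, 0), (PySem.List.pyGet? cords 3).getD (0, 0)]
  let top := pvTop board
  sel.all (fun c => decide (c.1 ≤ top.getD c.2 c.1))

-- ===== PRECONDITION & SPEC =====
-- Pre_ excludes exactly (a) the inputs where A raises IndexError (fewer than 4 cords, or a scanned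
-- cell outside the board) and (b) cords with a positive scan height and a NEGATIVE column index, on
-- which A silently reads a wrapped column via Python negative indexing — malformed coordinates for
-- this board game; B treats such a column as absent.
def pvOkCol (board : List (List Int)) (c : Int × Int) : Bool :=
  decide (c.1 ≤ (board.length : Int)) &&
  decide (0 < c.1 → 0 ≤ c.2) &&
  (List.range c.1.toNat).all (fun i =>
    (board[i]?).elim false (fun row => decide (PySem.Raise.InRange row.length c.2)))

def pvUsed (id : Int) : List Nat :=
  if id = 1 ∨ id = 4 then [2, 3] else if id = 2 ∨ id = 3 then [3] else [1, 3]

def Pre_canTerminated (block : Int × (List (Int × Int))) (board : List (List Int)) : Prop :=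
  4 ≤ block.2.length ∧
  ((pvUsed block.1).all (fun ci => (block.2[ci]?).elim false (pvOkCol board))) = true
instance (block : Int × (List (Int × Int))) (board : List (List Int)) : Decidable (Pre_canTerminated block board) := by
  unfold Pre_canTerminated; infer_instance

def pvWitness_canTerminated : (Int × (List (Int × Int))) × List (List Int) :=
  ((2, [(0, 0), (0, 0), (0, 0), (1, 0)]), [[0, 5]])

def Spec_canTerminated (block : Int × (List (Int × Int))) (board : List (List Int)) (out : Bool) : Prop := out = canTerminated_alt block board
instance (block : Int × (List (Int × Int))) (board : List (List Int)) (out : Bool) : Decidable (Spec_canTerminated block board out) := by unfold Spec_canTerminated; infer_instance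

-- ===== CLAIM (what is proved, stated in full; the proofs are below) =====
def Claim_equal_canTerminated : Prop := ∀ (block : Int × (List (Int × Int))) (board : List (List Int)), Dom_canTerminated block board → Pre_canTerminated block board → Spec_canTerminated block board (canTerminated block board)

-- ===== LEMMAS AND PROOFS =====

-- A's per-branch flag loop is a conjunction.
theorem pv_foldl_flag (f : Nat → Bool) (l : List Nat) : ∀ b0 : Bool,
    l.foldl (fun b i => if f i = false then false else b) b0 = (b0 && l.all f) := by
  induction l with
  | nil => intro b0; simp
  | cons a l ih =>
      intro b0
      rw [List.foldl_cons, List.all_cons, ih]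
      cases h : f a <;> simp

def pvColClear (board : List (List Int)) (c : Int × Int) : Bool :=
  (List.range c.1.toNat).all (fun (i : Nat) =>
    ((PySem.List.pyGet? board (i : Int)).bind (fun row => PySem.List.pyGet? row c.2)).getD 0 == 0)

theorem pvScanA_eq (board : List (List Int)) (c : Int × Int) (b0 : Bool) :
    pvScanA board c b0 = (b0 && pvColClear board c) := by
  unfold pvScanA pvColClear
  have hstep :
      (fun (b : Bool) (i : Nat) =>
        if ((PySem.List.pyGet? board (i : Int)).bind (fun row => PySem.List.pyGet? row c.2)).getD 0 ≠ 0
        then false else b) =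
      (fun (b : Bool) (i : Nat) =>
        if (((PySem.List.pyGet? board (i : Int)).bind (fun row => PySem.List.pyGet? row c.2)).getD 0 == 0) = false
        then false else b) := by
    funext b i
    by_cases h :
      ((PySem.List.pyGet? board (i : Int)).bind (fun row => PySem.List.pyGet? row c.2)).getD 0 = 0 <;>
      simp
  rw [hstep, pv_foldl_flag]

theorem pv_inner_get (i k : Int) : ∀ (l : List (Int × Int)) (d : PySem.Dict Int Int),
    ((l.foldl (fun d2 q => if q.2 ≠ 0 ∧ d2.contains q.1 = false then d2.insert q.1 i else d2) d).get? k)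
      = (d.get? k).or (if l.any (fun q => q.1 == k && q.2 != 0) then some i else none) := by
  intro l
  induction l with
  | nil => intro d; simp
  | cons q l ih =>
      intro d
      rw [List.foldl_cons, List.any_cons, ih]
      by_cases hc : q.2 ≠ 0 ∧ d.contains q.1 = false
      · rw [if_pos hc]
        by_cases hk : q.1 = k
        · have hd : d.get? k = none := by
            rw [← hk]
            exact (PySem.Dict.get?_eq_none_iff_contains d q.1).mpr hc.2
          rw [hk, PySem.Dict.get?_insert_self, hd]
          simp [hc.1]
        · rw [PySem.Dict.get?_insert_of_ne _ _ (fun h => hk h.symm)]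
          have hf : (q.1 == k && q.2 != 0) = false := by simp [hk]
          rw [hf, Bool.false_or]
      · rw [if_neg hc]
        by_cases hh : (q.1 == k && q.2 != 0) = true
        · have hk : q.1 = k := by simp at hh; exact hh.1
          have hnz : q.2 ≠ 0 := by simp at hh; exact hh.2
          have hcon : d.contains q.1 = true := by
            by_contra hc2
            exact hc ⟨hnz, by simpa using hc2⟩
          have hs : (d.get? k).isSome := by
            rw [PySem.Dict.contains_eq_isSome_get?] at hcon; rw [← hk]; exact hcon
          obtain ⟨v, hv⟩ := Option.isSome_iff_exists.mp hs
          rw [hh]; simp [hv]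
        · have hf : (q.1 == k && q.2 != 0) = false := by
            cases h2 : (q.1 == k && q.2 != 0) with
            | true => exact absurd h2 hh
            | false => rfl
          rw [hf, Bool.false_or]

def pvHitRow (row : List Int) (k : Int) : Bool :=
  (PySem.List.enumerate row 0).any (fun q => q.1 == k && q.2 != 0)

def pvFirst (l : List (Int × List Int)) (k : Int) : Option Int :=
  match l with
  | [] => none
  | p :: l => if pvHitRow p.2 k then some p.1 else pvFirst l k

theorem pvFirst_cons (p : Int × List Int) (l : List (Int × List Int)) (k : Int) :
    pvFirst (p :: l) k = if pvHitRow p.2 k then some p.1 else pvFirst l k := rfl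

theorem pv_outer_get (k : Int) : ∀ (l : List (Int × List Int)) (d : PySem.Dict Int Int),
    ((l.foldl (fun d p =>
        (PySem.List.enumerate p.2 0).foldl (fun d2 q => if q.2 ≠ 0 ∧ d2.contains q.1 = false then d2.insert q.1 p.1 else d2) d) d).get? k)
      = (d.get? k).or (pvFirst l k) := by
  intro l
  induction l with
  | nil => intro d; simp [pvFirst]
  | cons p l ih =>
      intro d
      rw [List.foldl_cons, ih, pv_inner_get, pvFirst_cons]
      unfold pvHitRow
      cases hh : (PySem.List.enumerate p.2 0).any (fun q => q.1 == k && q.2 != 0) with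
      | true => simp
      | false => simp

theorem pvHitRow_iff (row : List Int) (k : Int) :
    pvHitRow row k = true ↔ 0 ≤ k ∧ ∃ h : k.toNat < row.length, row[k.toNat] ≠ 0 := by
  unfold pvHitRow
  rw [List.any_eq_true]
  constructor
  · rintro ⟨q, hq, hpq⟩
    rw [PySem.List.mem_enumerate_iff] at hq
    obtain ⟨j, hj, rfl⟩ := hq
    simp at hpq
    obtain ⟨h1, h2⟩ := hpq
    have hk0 : 0 ≤ k := by omega
    have hkj : k.toNat = j := by omega
    exact ⟨hk0, by rw [hkj]; exact ⟨hj, h2⟩⟩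
  · rintro ⟨hk0, hlt, hnz⟩
    refine ⟨((k.toNat : Int), row[k.toNat]), ?_, ?_⟩
    · rw [PySem.List.mem_enumerate_iff]
      exact ⟨k.toNat, hlt, by simp⟩
    · simp [hnz]; omega

theorem pvTop_get (board : List (List Int)) (k : Int) :
    (pvTop board).get? k = pvFirst (PySem.List.enumerate board 0) k := by
  unfold pvTop
  rw [pv_outer_get]
  simp

-- pvFirst over an enumeration: characterisation as "first hitting row"
theorem pvFirst_enum_none (k : Int) : ∀ (rows : List (List Int)) (s : Int),
    pvFirst (PySem.List.enumerate rows s) k = none ↔ ∀ i < rows.length, pvHitRow (rows.getD i []) k = false := by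
  intro rows
  induction rows with
  | nil => intro s; simp [PySem.List.enumerate_nil, pvFirst]
  | cons r rows ih =>
      intro s
      rw [PySem.List.enumerate_cons, pvFirst_cons]
      by_cases h : pvHitRow r k = true
      · rw [if_pos h]
        constructor
        · intro hc; exact absurd hc (by simp)
        · intro hall; exfalso; have := hall 0 (by simp); simp [h] at this
      · have hf : pvHitRow r k = false := by cases h2 : pvHitRow r k; rfl; exact absurd h2 h
        rw [hf, if_neg (by simp), ih]
        constructor
        · intro hall i hi
          cases i with
          | zero => simpa using hf
          | succ n => exact hall n (by simpa using hi)
        · intro hall i hi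
          exact hall (i+1) (by simpa using hi)

theorem pvFirst_enum_some (k : Int) : ∀ (rows : List (List Int)) (s : Int) (v : Int),
    pvFirst (PySem.List.enumerate rows s) k = some v →
      ∃ j : Nat, v = s + j ∧ j < rows.length ∧ pvHitRow (rows.getD j []) k = true ∧
        ∀ i < j, pvHitRow (rows.getD i []) k = false := by
  intro rows
  induction rows with
  | nil => intro s v h; simp [PySem.List.enumerate_nil, pvFirst] at h
  | cons r rows ih =>
      intro s v h
      rw [PySem.List.enumerate_cons, pvFirst_cons] at h
      by_cases hh : pvHitRow r k = true
      · rw [if_pos hh] at h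
        injection h with h'
        refine ⟨0, by omega, by simp, by simpa using hh, fun i hi => absurd hi (by omega)⟩
      · rw [if_neg hh] at h
        obtain ⟨j, hv, hj, hhit, hbefore⟩ := ih (s+1) v h
        refine ⟨j+1, by omega, by simpa using hj, by simpa using hhit, ?_⟩
        intro i hi
        cases i with
        | zero => simpa using (by cases h2 : pvHitRow r k; rfl; exact absurd h2 hh : pvHitRow r k = false)
        | succ n => exact (by simpa using hbefore n (by omega))

-- what A's inner loop reads at row i, as (the negation of) a column hit
theorem pv_read (board : List (List Int)) (sx : Int) (i : Nat) (hi : i < board.length)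
    (h0 : 0 ≤ sx) (hin : PySem.Raise.InRange (board.getD i []).length sx) :
    (((PySem.List.pyGet? board (i : Int)).bind (fun row => PySem.List.pyGet? row sx)).getD 0 == 0)
      = ! pvHitRow (board.getD i []) sx := by
  have hrow : PySem.List.pyGet? board (i : Int) = some (board.getD i []) := by
    rw [PySem.List.pyGet?_natCast, List.getD_eq_getElem _ _ hi, List.getElem?_eq_getElem hi]
  rw [hrow]
  have hlt : sx.toNat < (board.getD i []).length := by
    unfold PySem.Raise.InRange at hin
    omega
  have hget : PySem.List.pyGet? (board.getD i []) sx = some ((board.getD i [])[sx.toNat]) := by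
    rw [PySem.List.pyGet?_of_nonneg _ h0]
    simp
  rw [Option.bind_some, hget]
  by_cases hz : (board.getD i [])[sx.toNat] = 0
  · have hh : pvHitRow (board.getD i []) sx = false := by
      cases h2 : pvHitRow (board.getD i []) sx
      · rfl
      · rw [pvHitRow_iff] at h2
        obtain ⟨_, _, hnz⟩ := h2
        exact absurd hz hnz
    show ((board.getD i [])[sx.toNat]'hlt == 0) = !pvHitRow (board.getD i []) sx
    rw [hh, hz]
    rfl
  · have hh : pvHitRow (board.getD i []) sx = true := by
      rw [pvHitRow_iff]; exact ⟨h0, hlt, hz⟩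
    show ((board.getD i [])[sx.toNat]'hlt == 0) = !pvHitRow (board.getD i []) sx
    rw [hh]
    simp
    exact hz

theorem pv_col_eq (board : List (List Int)) (c : Int × Int) (h : pvOkCol board c = true) :
    pvColClear board c = decide (c.1 ≤ (pvTop board).getD c.2 c.1) := by
  unfold pvOkCol at h
  rw [Bool.and_assoc, Bool.and_eq_true, Bool.and_eq_true] at h
  obtain ⟨h1, h2, h3⟩ := h
  rw [decide_eq_true_iff] at h1
  rw [decide_eq_true_iff] at h2
  rw [List.all_eq_true] at h3
  have hlen : ∀ i : Nat, i < c.1.toNat → i < board.length := by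
    intro i hi; omega
  have hin : ∀ i : Nat, i < c.1.toNat → PySem.Raise.InRange (board.getD i []).length c.2 := by
    intro i hi
    have := h3 i (List.mem_range.mpr hi)
    rw [List.getElem?_eq_getElem (hlen i hi)] at this
    simp only [Option.elim_some, decide_eq_true_iff] at this
    simpa [List.getD, List.getElem?_eq_getElem (hlen i hi)] using this
  rw [PySem.Dict.getD_eq_get?_getD, pvTop_get]
  cases hm : pvFirst (PySem.List.enumerate board 0) c.2 with
  | none =>
      rw [pvFirst_enum_none] at hm
      simp only [Option.getD_none]
      rw [Bool.eq_iff_iff, decide_eq_true_iff]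
      refine ⟨fun _ => le_refl c.1, fun _ => ?_⟩
      unfold pvColClear
      rw [List.all_eq_true]
      intro i hi
      rw [List.mem_range] at hi
      have h0 : 0 ≤ c.2 := h2 (by omega)
      rw [pv_read board c.2 i (hlen i hi) h0 (hin i hi), hm i (hlen i hi)]
      rfl
  | some v =>
      obtain ⟨j, hv, hj, hhit, hbefore⟩ := pvFirst_enum_some c.2 board 0 v hm
      simp only [Option.getD_some]
      by_cases hle : c.1 ≤ v
      · rw [Bool.eq_iff_iff, decide_eq_true_iff]
        refine ⟨fun _ => hle, fun _ => ?_⟩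
        unfold pvColClear
        rw [List.all_eq_true]
        intro i hi
        rw [List.mem_range] at hi
        have h0 : 0 ≤ c.2 := h2 (by omega)
        have hij : i < j := by omega
        rw [pv_read board c.2 i (hlen i hi) h0 (hin i hi), hbefore i hij]
        rfl
      · rw [Bool.eq_iff_iff, decide_eq_true_iff]
        apply iff_of_false _ hle
        intro hcc
        unfold pvColClear at hcc
        rw [List.all_eq_true] at hcc
        have hjc : j < c.1.toNat := by omega
        have h0 : 0 ≤ c.2 := h2 (by omega)
        have := hcc j (List.mem_range.mpr hjc)
        rw [pv_read board c.2 j (hlen j hjc) h0 (hin j hjc), hhit] at this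
        simp at this

theorem pv_two (board : List (List Int)) (a b : Int × Int)
    (ha : pvOkCol board a = true) (hb : pvOkCol board b = true) :
    pvScanA board b (pvScanA board a true) =
      [a, b].all (fun c => decide (c.1 ≤ (pvTop board).getD c.2 c.1)) := by
  rw [pvScanA_eq, pvScanA_eq, pv_col_eq _ _ ha, pv_col_eq _ _ hb]
  simp

theorem pv_one (board : List (List Int)) (b : Int × Int) (hb : pvOkCol board b = true) :
    pvScanA board b true = [b].all (fun c => decide (c.1 ≤ (pvTop board).getD c.2 c.1)) := by
  rw [pvScanA_eq, pv_col_eq _ _ hb]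
  simp

-- ===== VERDICT (by name: the statement is the Claim_ definition above) =====
theorem canTerminated_spec : Claim_equal_canTerminated := by
  intro block board _ hpre
  obtain ⟨hlen4, hall⟩ := hpre
  unfold Spec_canTerminated canTerminated canTerminated_alt
  dsimp only
  have h1l : 1 < block.2.length := by omega
  have h2l : 2 < block.2.length := by omega
  have h3l : 3 < block.2.length := by omega
  rw [show PySem.List.pyGet? block.2 1 = some block.2[1] from PySem.List.pyGet?_ofNat block.2 1 h1l,
      show PySem.List.pyGet? block.2 2 = some block.2[2] from PySem.List.pyGet?_ofNat block.2 2 h2l,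
      show PySem.List.pyGet? block.2 3 = some block.2[3] from PySem.List.pyGet?_ofNat block.2 3 h3l]
  simp only [Option.getD_some]
  by_cases hid1 : block.1 = 1
  · rw [hid1] at hall ⊢
    have e : pvUsed 1 = [2, 3] := by norm_num [pvUsed]
    rw [e, List.all_cons, List.all_cons, List.all_nil,
        List.getElem?_eq_getElem h2l, List.getElem?_eq_getElem h3l] at hall
    simp only [Option.elim_some, Bool.and_true, Bool.and_eq_true] at hall
    rw [if_pos rfl, if_pos (Or.inl rfl)]
    exact pv_two board _ _ hall.1 hall.2
  · by_cases hid2 : block.1 = 2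
    · rw [hid2] at hall ⊢
      have e : pvUsed 2 = [3] := by norm_num [pvUsed]
      rw [e, List.all_cons, List.all_nil, List.getElem?_eq_getElem h3l] at hall
      simp only [Option.elim_some, Bool.and_true] at hall
      rw [if_neg (by norm_num), if_pos rfl, if_neg (by norm_num), if_pos (Or.inl rfl)]
      exact pv_one board _ hall
    · by_cases hid3 : block.1 = 3
      · rw [hid3] at hall ⊢
        have e : pvUsed 3 = [3] := by norm_num [pvUsed]
        rw [e, List.all_cons, List.all_nil, List.getElem?_eq_getElem h3l] at hall
        simp only [Option.elim_some, Bool.and_true] at hall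
        rw [if_neg (by norm_num), if_neg (by norm_num), if_pos rfl,
            if_neg (by norm_num), if_pos (Or.inr rfl)]
        exact pv_one board _ hall
      · by_cases hid4 : block.1 = 4
        · rw [hid4] at hall ⊢
          have e : pvUsed 4 = [2, 3] := by norm_num [pvUsed]
          rw [e, List.all_cons, List.all_cons, List.all_nil,
              List.getElem?_eq_getElem h2l, List.getElem?_eq_getElem h3l] at hall
          simp only [Option.elim_some, Bool.and_true, Bool.and_eq_true] at hall
          rw [if_neg (by norm_num), if_neg (by norm_num), if_neg (by norm_num), if_pos rfl,
              if_pos (Or.inr rfl)]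
          exact pv_two board _ _ hall.1 hall.2
        · have e : pvUsed block.1 = [1, 3] := by
            unfold pvUsed
            rw [if_neg (by simp [hid1, hid4]), if_neg (by simp [hid2, hid3])]
          rw [e, List.all_cons, List.all_cons, List.all_nil,
              List.getElem?_eq_getElem h1l, List.getElem?_eq_getElem h3l] at hall
          simp only [Option.elim_some, Bool.and_true, Bool.and_eq_true] at hall
          rw [if_neg hid1, if_neg hid2, if_neg hid3, if_neg hid4,
              if_neg (by simp [hid1, hid4]), if_neg (by simp [hid2, hid3])]
          exact pv_two board _ _ hall.1 hall.2
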